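-- pv_equiv track=rewrite | github.com/ykm11/useless | useless/crypto/math.py | isqrt
-- ===== SOURCE A (Python) =====
-- def isqrt(n):
--     """
--         check whether arg_n is square number, or not.
--
--         RETURN :
--             if n is sq_num -> sqrt(n)
--             otherwise -> -1
--     """
--
--     l = 0
--     r = n
--     while r - l > 1:
--         m = (l + r) >> 1
--         if m**2 < n:
--             l = m
--         else:
--             r = m
--
--     if r**2 == n:
--         return r
--     else:
--         return -1
-- ===== SOURCE B (Python) =====
-- def isqrt(n):
--     # Newton's iteration for floor-sqrt, then perfect-square check.
--     if n < 0:
--         return -1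
--     if n == 0:
--         return 0
--     x = n
--     y = (x + 1) // 2
--     while y < x:
--         x = y
--         y = (x + n // x) // 2
--     return x if x * x == n else -1
-- ===== Notes on version B (the rewrite author's own statement) =====
-- stated objective: alternative
-- what changed: Replaces the l/r bisection loop with Newton's iteration (x=n; y=(x+1)//2; while y<x: x=y; y=(x+n//x)//2) to obtain the floor square root, with explicit n<0 and n==0 cases, then the same perfect-square check.
import Mathlib
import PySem

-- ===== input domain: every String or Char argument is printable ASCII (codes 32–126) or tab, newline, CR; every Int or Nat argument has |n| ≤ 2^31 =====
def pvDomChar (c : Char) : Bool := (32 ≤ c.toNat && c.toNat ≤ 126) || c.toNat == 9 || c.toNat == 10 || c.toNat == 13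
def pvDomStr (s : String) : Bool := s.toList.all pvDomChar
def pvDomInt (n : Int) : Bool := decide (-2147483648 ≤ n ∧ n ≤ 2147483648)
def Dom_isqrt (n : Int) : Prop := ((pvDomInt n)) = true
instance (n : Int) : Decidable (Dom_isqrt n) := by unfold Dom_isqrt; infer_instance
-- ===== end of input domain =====

-- B replaces A's binary search by Newton's iteration for the floor square root;
-- same perfect-square check; alternative algorithm, not claimed faster.

-- ===== PORT A =====
-- while r - l > 1: m = (l+r)>>1; if m**2 < n: l = m else r = m
def isqrtLoopA (n l r : Int) : Int :=
  if r - l > 1 then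
    let m := PySem.Int.floordiv (l + r) 2
    if m * m < n then isqrtLoopA n m r else isqrtLoopA n l m
  else r
termination_by (r - l).toNat
decreasing_by
  · have h := PySem.Int.floordiv_mul_add_mod (l + r) 2
    have h2 : 0 ≤ PySem.Int.mod (l + r) 2 ∧ PySem.Int.mod (l + r) 2 < 2 := by
      exact ⟨PySem.Int.mod_nonneg _ (by omega), PySem.Int.mod_lt _ (by omega)⟩
    omega
  · have h := PySem.Int.floordiv_mul_add_mod (l + r) 2
    have h2 : 0 ≤ PySem.Int.mod (l + r) 2 ∧ PySem.Int.mod (l + r) 2 < 2 := by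
      exact ⟨PySem.Int.mod_nonneg _ (by omega), PySem.Int.mod_lt _ (by omega)⟩
    omega

def isqrt (n : Int) : Int :=
  let r := isqrtLoopA n 0 n
  if r * r = n then r else -1

-- ===== PORT B =====
-- while y < x: x = y; y = (x + n // x) // 2     (fuel only makes the loop total;
-- n+1 steps always suffice since x strictly decreases and stays positive)
def isqrtLoopB (fuel : Nat) (n x y : Int) : Int :=
  match fuel with
  | 0 => x
  | fuel + 1 =>
    if y < x then
      isqrtLoopB fuel n y (PySem.Int.floordiv (y + PySem.Int.floordiv n y) 2)
    else x

def isqrt_alt (n : Int) : Int :=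
  if n < 0 then -1
  else if n = 0 then 0
  else
    let x := isqrtLoopB (n.toNat + 1) n n (PySem.Int.floordiv (n + 1) 2)
    if x * x = n then x else -1

-- ===== PRECONDITION & SPEC =====
def Spec_isqrt (n : Int) (out : Int) : Prop := out = isqrt_alt n
instance (n : Int) (out : Int) : Decidable (Spec_isqrt n out) := by unfold Spec_isqrt; infer_instance

-- ===== CLAIM (what is proved, stated in full; the proofs are below) =====
def Claim_equal_isqrt : Prop := ∀ (n : Int), Dom_isqrt n → Spec_isqrt n (isqrt n)

-- ===== LEMMAS AND PROOFS =====


theorem pv_mid_bounds (a : Int) :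
    2 * PySem.Int.floordiv a 2 ≤ a ∧ a < 2 * PySem.Int.floordiv a 2 + 2 := by
  have h := PySem.Int.floordiv_mul_add_mod a 2
  have h1 := PySem.Int.mod_nonneg a (by omega : (0:Int) < 2)
  have h2 := PySem.Int.mod_lt a (by omega : (0:Int) < 2)
  omega

theorem loopA_spec (n l r : Int) :
    l * l < n → n ≤ r * r → l < r →
    (isqrtLoopA n l r - 1) * (isqrtLoopA n l r - 1) < n ∧
      n ≤ isqrtLoopA n l r * isqrtLoopA n l r := by
  fun_induction isqrtLoopA n l r with
  | case1 l r hg m hlt ih =>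
    intro h1 h2 h3
    exact ih hlt h2 (by have := pv_mid_bounds (l + r); omega)
  | case2 l r hg m hlt ih =>
    intro h1 h2 h3
    exact ih h1 (by omega) (by have := pv_mid_bounds (l + r); omega)
  | case3 l r hg =>
    intro h1 h2 h3
    have hr : r = l + 1 := by omega
    constructor
    · simpa [hr] using h1
    · exact h2

theorem pv_sq_le (a b : Int) (hb : 0 ≤ b) (h : a * a ≤ b * b) : a ≤ b := by
  by_contra h'
  rw [not_le] at h'
  nlinarith

theorem pv_sq_lt (a b : Int) (ha : 0 ≤ a) (hb : 0 ≤ b) (h : a * a < b * b) : a < b := by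
  by_contra h'
  rw [not_lt] at h'
  nlinarith

theorem newton_ge (n s x : Int) (hx : 1 ≤ x) (_hs : 0 ≤ s) (hsn : s * s ≤ n) :
    s ≤ PySem.Int.floordiv (x + PySem.Int.floordiv n x) 2 := by
  have h1 : 2 * s - x ≤ PySem.Int.floordiv n x := by
    rw [PySem.Int.le_floordiv_iff_mul_le (by omega)]
    nlinarith [sq_nonneg (s - x)]
  rw [PySem.Int.le_floordiv_iff_mul_le (by omega : (0:Int) < 2)]
  omega

theorem newton_lt (n s x : Int) (hsx : s < x) (hs : 1 ≤ s) (hn : n < (s + 1) * (s + 1)) :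
    PySem.Int.floordiv (x + PySem.Int.floordiv n x) 2 < x := by
  have h1 : PySem.Int.floordiv n x < x := by
    rw [PySem.Int.floordiv_lt_iff_lt_mul (by omega)]
    nlinarith
  rw [PySem.Int.floordiv_lt_iff_lt_mul (by omega : (0:Int) < 2)]
  omega

theorem loopB_spec (n s : Int) (hs : 1 ≤ s) (hsn : s * s ≤ n) (hn : n < (s + 1) * (s + 1)) :
    ∀ (fuel : Nat) (x y : Int), s ≤ x → x ≤ (fuel : Int) →
      y = PySem.Int.floordiv (x + PySem.Int.floordiv n x) 2 →
      isqrtLoopB fuel n x y = s := by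
  intro fuel
  induction fuel with
  | zero => intro x y hx hf _; exact absurd hf (by push_cast; omega)
  | succ fuel ih =>
    intro x y hx hf hy
    simp only [isqrtLoopB]
    split
    · rename_i hyx
      apply ih
      · exact hy ▸ newton_ge n s x (by omega) (by omega) hsn
      · push_cast at hf ⊢; omega
      · rfl
    · rename_i hyx
      have hxs : ¬ s < x := fun h => hyx (hy ▸ newton_lt n s x h hs hn)
      omega


-- ===== VERDICT (by name: the statement is the Claim_ definition above) =====
theorem isqrt_spec : Claim_equal_isqrt := by
  unfold Claim_equal_isqrt Spec_isqrt
  intro n _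
  by_cases hneg : n < 0
  · have hA : isqrtLoopA n 0 n = n := by
      unfold isqrtLoopA; rw [if_neg (by omega)]
    have hnn : ¬ (n * n = n) := by intro h; nlinarith
    simp only [isqrt, isqrt_alt, hA, if_neg hnn, if_pos hneg]
  · rw [not_lt] at hneg
    by_cases h0 : n = 0
    · subst h0
      have hA : isqrtLoopA 0 0 0 = 0 := by
        unfold isqrtLoopA; rw [if_neg (by omega)]
      simp only [isqrt, isqrt_alt, hA]
      norm_num
    · have hpos : 1 ≤ n := by omega
      have hn' : (n.toNat : Int) = n := Int.toNat_of_nonneg (by omega)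
      have hs1 : (Nat.sqrt n.toNat : Int) * (Nat.sqrt n.toNat : Int) ≤ n := by
        have := Nat.sqrt_le n.toNat
        omega
      have hs2 : n < ((Nat.sqrt n.toNat : Int) + 1) * ((Nat.sqrt n.toNat : Int) + 1) := by
        have h := Nat.lt_succ_sqrt n.toNat
        rw [Nat.succ_eq_add_one] at h
        rw [← hn']
        exact_mod_cast h
      set s : Int := (Nat.sqrt n.toNat : Int) with hsdef
      have hspos : 1 ≤ s := by
        have : 0 < Nat.sqrt n.toNat := Nat.sqrt_pos.mpr (by omega)
        omega
      have hfdivnn : PySem.Int.floordiv n n = 1 := by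
        rw [PySem.Int.floordiv_eq_iff_of_pos (by omega)]
        constructor <;> nlinarith
      have hB : isqrtLoopB (n.toNat + 1) n n (PySem.Int.floordiv (n + 1) 2) = s := by
        apply loopB_spec n s hspos hs1 hs2
        · nlinarith
        · push_cast; omega
        · rw [hfdivnn]
      have hAn : isqrt n = if (isqrtLoopA n 0 n) * (isqrtLoopA n 0 n) = n
          then isqrtLoopA n 0 n else -1 := rfl
      have hA := loopA_spec n 0 n (by omega) (by nlinarith) (by omega)
      set c := isqrtLoopA n 0 n with hc
      obtain ⟨hA1, hA2⟩ := hA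
      have hc1 : 1 ≤ c := by nlinarith
      have hBn : isqrt_alt n = if s * s = n then s else -1 := by
        simp only [isqrt_alt]
        rw [if_neg (by omega), if_neg h0, hB]
      rw [hAn, hBn]
      by_cases hcc : c * c = n
      · have h1 : s ≤ c := pv_sq_le s c (by omega) (by omega)
        have h2 : c < s + 1 := pv_sq_lt c (s + 1) (by omega) (by omega) (by omega)
        have hsc : s = c := by omega
        rw [if_pos hcc, if_pos (by rw [hsc]; exact hcc), hsc]
      · have hss : ¬ (s * s = n) := by
          intro h
          have h1 : s ≤ c := pv_sq_le s c (by omega) (by omega)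
          have h2 : c - 1 < s := pv_sq_lt (c - 1) s (by omega) (by omega) (by omega)
          exact hcc (by rw [show c = s by omega]; exact h)
        rw [if_neg hcc, if_neg hss]
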